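-- pv_equiv track=rewrite | github.com/Senespera/compiler_pascal | final_pascal/lexer/lexer.py | process_literal
-- ===== SOURCE A (Python) =====
-- def process_literal(text):
--     isstring = False
--     buffer = ""
--     output = ""
--     for t in text:
--         if isstring:
--             if t == "'":
--                 isstring = False
--             else:
--                 output += t
--         else:
--             if t == "'":
--                 isstring = True
--                 if buffer:
--                     output += chr(int(buffer))
--                     buffer = ""
--             elif t.isdigit():
--                 buffer += t
--             elif t == "#":
--                 if buffer:
--                     output += chr(int(buffer))
--                     buffer = ""
--     if buffer:
--         output += chr(int(buffer))
--         buffer = ""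
--     return f"'{output}'"
-- ===== SOURCE B (Python) =====
-- def process_literal(text):
--     # Split on quotes: even-indexed pieces are char-code sections, odd-indexed are string bodies.
--     out = []
--     code = True
--     for seg in text.split("'"):
--         if code:
--             for piece in seg.split('#'):
--                 digits = ''.join(c for c in piece if c.isdigit())
--                 if digits:
--                     out.append(chr(int(digits)))
--         else:
--             out.append(seg)
--         code = not code
--     return "'" + ''.join(out) + "'"
-- ===== Notes on version B (the rewrite author's own statement) =====
-- stated objective: simpler
-- what changed: Replaces the char-by-char boolean/buffer state machine with a split decomposition: split the text on quotes (odd pieces are copied literally), split each code piece on the hash separator, and turn the digits of each such piece into one chr.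
-- outside the precondition, e.g. on process_literal('#1114112'): A raises ValueError, B raises ValueError
import Mathlib
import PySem

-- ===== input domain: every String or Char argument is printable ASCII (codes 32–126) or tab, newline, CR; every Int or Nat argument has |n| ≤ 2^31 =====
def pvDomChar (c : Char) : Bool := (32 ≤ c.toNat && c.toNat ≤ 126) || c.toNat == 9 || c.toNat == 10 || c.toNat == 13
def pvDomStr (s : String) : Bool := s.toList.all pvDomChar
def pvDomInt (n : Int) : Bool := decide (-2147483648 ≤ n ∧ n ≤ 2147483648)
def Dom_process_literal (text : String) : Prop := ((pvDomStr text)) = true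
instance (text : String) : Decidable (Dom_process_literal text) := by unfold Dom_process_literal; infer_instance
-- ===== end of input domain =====

-- B replaces A's char-by-char quote/digit state machine by a split-on-quote /
-- split-on-hash decomposition (objective: simpler, same cost).


-- int(buffer) on an all-digit ASCII buffer: exact hand port of the decimal value
def pvDec (cs : List Char) : Nat := cs.foldl (fun n c => 10 * n + (c.toNat - 48)) 0

-- ===== PORT A =====
-- chr(int(buffer)) ported as Char.ofNat (pvDec buffer): exact where the code is a
-- Unicode scalar value (guaranteed by Pre_); buffer only ever holds ASCII digits.
def process_literal (text : String) : String :=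
  let step : (Bool × List Char × List Char) → Char → (Bool × List Char × List Char) :=
    fun st t =>
      let (isstring, buffer, output) := st
      if isstring then
        if t = '\'' then (false, buffer, output)
        else (true, buffer, output ++ [t])
      else
        if t = '\'' then
          if buffer ≠ [] then (true, [], output ++ [Char.ofNat (pvDec buffer)])
          else (true, buffer, output)
        else if PySem.Chars.isdigit t then (false, buffer ++ [t], output)
        else if t = '#' then
          if buffer ≠ [] then (false, [], output ++ [Char.ofNat (pvDec buffer)])
          else (false, buffer, output)
        else (false, buffer, output)
  let r := text.toList.foldl step (false, [], [])
  let output := if r.2.1 ≠ [] then r.2.2 ++ [Char.ofNat (pvDec r.2.1)] else r.2.2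
  String.mk ('\'' :: output ++ ['\''])

-- ===== PORT B =====
-- text.split("'") / seg.split('#') ported as List.splitOn (Python split with a
-- one-char separator, empties kept); the digit filter + chr as in Source B.
def process_literal_alt (text : String) : String :=
  let segStep : List Char → List Char → List Char := fun acc piece =>
    let digits := piece.filter PySem.Chars.isdigit
    if digits ≠ [] then acc ++ [Char.ofNat (pvDec digits)] else acc
  let step : (Bool × List Char) → List Char → (Bool × List Char) :=
    fun st seg =>
      let (code, out) := st
      (!code,
        if code then out ++ (seg.splitOn '#').foldl segStep []
        else out ++ seg)
  let r := (text.toList.splitOn '\'').foldl step (true, [])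
  String.mk ('\'' :: r.2 ++ ['\''])

-- ===== PRECONDITION & SPEC =====
def pvEvens {α : Type} : List α → List α
  | [] => []
  | [a] => [a]
  | a :: _ :: r => a :: pvEvens r

-- the char codes the literal asks for (code sections = even quote-split pieces)
def pvCodes (text : String) : List Nat :=
  (pvEvens (text.toList.splitOn '\'')).flatMap fun seg =>
    (seg.splitOn '#').filterMap fun piece =>
      let d := piece.filter PySem.Chars.isdigit
      if d = [] then none else some (pvDec d)

-- Pre_ excludes texts asking for a char code ≥ 0x110000 (Python's chr raises
-- ValueError, so A raises) or a surrogate code 0xD800–0xDFFF (A returns a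
-- lone-surrogate str that is not representable as a Lean String).
def Pre_process_literal (text : String) : Prop :=
  ∀ n ∈ pvCodes text, n < 0xD800 ∨ (0xDFFF < n ∧ n < 0x110000)
instance (text : String) : Decidable (Pre_process_literal text) := by
  unfold Pre_process_literal; infer_instance

def pvWitness_process_literal : String := "65'ab'#66x7"

def Spec_process_literal (text : String) (out : String) : Prop := out = process_literal_alt text
instance (text : String) (out : String) : Decidable (Spec_process_literal text out) := by unfold Spec_process_literal; infer_instance

-- ===== CLAIM (what is proved, stated in full; the proofs are below) =====
def Claim_equal_process_literal : Prop := ∀ (text : String), Dom_process_literal text → Pre_process_literal text → Spec_process_literal text (process_literal text)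

-- ===== LEMMAS AND PROOFS =====

def pvEmit (b : List Char) : List Char :=
  if b ≠ [] then [Char.ofNat (pvDec b)] else []

-- A's state machine as mutual structural recursion (code mode / string mode)
mutual
  def pvRunF (b : List Char) : List Char → List Char
    | [] => pvEmit b
    | c :: r =>
      if c = '\'' then pvEmit b ++ pvRunT [] r
      else if PySem.Chars.isdigit c then pvRunF (b ++ [c]) r
      else if c = '#' then pvEmit b ++ pvRunF [] r
      else pvRunF b r
  def pvRunT (b : List Char) : List Char → List Char
    | [] => pvEmit b
    | c :: r => if c = '\'' then pvRunF b r else c :: pvRunT b r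
end

-- B's nested-split result, with a pending digit buffer threaded into the first '#'-piece
def pvPieceOut (b : List Char) (s : List Char) : List Char :=
  match s.splitOn '#' with
  | [] => pvEmit b
  | p :: ps =>
    pvEmit (b ++ p.filter PySem.Chars.isdigit) ++
      (ps.map (fun q => pvEmit (q.filter PySem.Chars.isdigit))).flatten

mutual
  def pvGC (b : List Char) : List (List Char) → List Char
    | [] => pvEmit b
    | s :: r => pvPieceOut b s ++ pvGS r
  def pvGS : List (List Char) → List Char
    | [] => []
    | s :: r => s ++ pvGC [] r
end

theorem pv_splitOn_ne_nil (c : Char) (xs : List Char) : xs.splitOn c ≠ [] :=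
  List.splitOnP_ne_nil _ xs

theorem pvPieceOut_nil (b : List Char) : pvPieceOut b [] = pvEmit b := by
  simp [pvPieceOut, List.splitOn, List.splitOnP_nil]

theorem pvPieceOut_cons (b : List Char) (c : Char) (s : List Char) :
    pvPieceOut b (c :: s) =
      if c = '#' then pvEmit b ++ pvPieceOut [] s
      else if PySem.Chars.isdigit c then pvPieceOut (b ++ [c]) s
      else pvPieceOut b s := by
  obtain ⟨p, ps, hps⟩ : ∃ p ps, s.splitOn '#' = p :: ps := by
    cases h : s.splitOn '#' with
    | nil => exact absurd h (pv_splitOn_ne_nil _ _)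
    | cons p ps => exact ⟨p, ps, rfl⟩
  by_cases hc : c = '#'
  · subst hc
    simp only [List.splitOn] at hps
    simp [pvPieceOut, List.splitOn, List.splitOnP_cons, hps, pvEmit]
  · have hsp : (c :: s).splitOn '#' = (c :: p) :: ps := by
      simp only [List.splitOn] at hps ⊢
      simp [List.splitOnP_cons, hc, hps]
    by_cases hd : PySem.Chars.isdigit c
    · simp [pvPieceOut, hsp, hps, hc, hd, List.filter]
    · simp [pvPieceOut, hsp, hps, hc, hd, List.filter]

-- main bridge: the state machine equals the split decomposition
theorem pvRun_eq_split (cs : List Char) :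
    (∀ b, pvRunF b cs = pvGC b (cs.splitOn '\'')) ∧
      pvRunT [] cs = pvGS (cs.splitOn '\'') := by
  induction cs with
  | nil =>
    constructor
    · intro b
      simp [pvRunF, List.splitOn, List.splitOnP_nil, pvGC, pvGS, pvPieceOut_nil]
    · simp [pvRunT, List.splitOn, List.splitOnP_nil, pvGS, pvGC, pvEmit]
  | cons c r ih =>
    obtain ⟨s1, rest, hsp⟩ : ∃ s1 rest, r.splitOn '\'' = s1 :: rest := by
      cases h : r.splitOn '\'' with
      | nil => exact absurd h (pv_splitOn_ne_nil _ _)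
      | cons s1 rest => exact ⟨s1, rest, rfl⟩
    by_cases hq : c = '\''
    · subst hq
      have hsp' : ('\'' :: r).splitOn '\'' = [] :: r.splitOn '\'' := by
        simp [List.splitOn, List.splitOnP_cons]
      constructor
      · intro b
        simp only [pvRunF, hsp', pvGC, pvPieceOut_nil]
        rw [ih.2]
        simp
      · simp only [pvRunT, hsp', pvGS]
        rw [ih.1]
        simp
    · have hsp' : (c :: r).splitOn '\'' = (c :: s1) :: rest := by
        simp only [List.splitOn] at hsp ⊢
        simp [List.splitOnP_cons, hq, hsp]
      constructor
      · intro b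
        rw [hsp']
        simp only [pvGC]
        rw [pvPieceOut_cons b c s1]
        by_cases hd : PySem.Chars.isdigit c
        · have hh : c ≠ '#' := by
            intro h; subst h; simp [PySem.Chars.isdigit] at hd
          simp only [pvRunF, if_neg hq, if_pos hd, if_neg hh]
          rw [ih.1 (b ++ [c]), hsp]
          simp [pvGC]
        · by_cases hh : c = '#'
          · subst hh
            simp only [pvRunF, if_neg hq, if_neg hd]
            rw [ih.1 [], hsp]
            simp [pvGC, List.append_assoc]
          · simp only [pvRunF, if_neg hq, if_neg hd, if_neg hh]
            rw [ih.1 b, hsp]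
            simp [pvGC]
      · rw [hsp']
        simp only [pvRunT, if_neg hq, pvGS]
        rw [ih.2, hsp]
        simp [pvGS]

-- A's fold, from any state, computes pvRunF / pvRunT
theorem pvFoldA (cs : List Char) : ∀ (iss : Bool) (b out : List Char),
    (let r := cs.foldl (fun st t =>
        let (isstring, buffer, output) := st
        if isstring then
          if t = '\'' then (false, buffer, output)
          else (true, buffer, output ++ [t])
        else
          if t = '\'' then
            if buffer ≠ [] then (true, ([] : List Char), output ++ [Char.ofNat (pvDec buffer)])
            else (true, buffer, output)
          else if PySem.Chars.isdigit t then (false, buffer ++ [t], output)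
          else if t = '#' then
            if buffer ≠ [] then (false, ([] : List Char), output ++ [Char.ofNat (pvDec buffer)])
            else (false, buffer, output)
          else (false, buffer, output)) (iss, b, out)
      if r.2.1 ≠ [] then r.2.2 ++ [Char.ofNat (pvDec r.2.1)] else r.2.2) =
    out ++ (if iss then pvRunT b cs else pvRunF b cs) := by
  induction cs with
  | nil =>
    intro iss b out
    cases iss <;> simp [pvRunF, pvRunT, pvEmit] <;> split_ifs <;> simp_all
  | cons c r ih =>
    intro iss b out
    cases iss
    · by_cases hq : c = '\''
      · subst hq
        by_cases hb : b ≠ []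
        · simpa [List.foldl_cons, hb, pvRunF, pvEmit, List.append_assoc] using
            ih true [] (out ++ [Char.ofNat (pvDec b)])
        · simp only [ne_eq, not_not] at hb; subst hb
          simpa [List.foldl_cons, pvRunF, pvEmit] using ih true [] out
      · by_cases hd : PySem.Chars.isdigit c
        · have hh : c ≠ '#' := by
            intro h; subst h; simp [PySem.Chars.isdigit] at hd
          simpa [List.foldl_cons, hq, hd, hh, pvRunF] using ih false (b ++ [c]) out
        · by_cases hh : c = '#'
          · subst hh
            by_cases hb : b ≠ []
            · simpa [List.foldl_cons, hq, hd, hb, pvRunF, pvEmit, List.append_assoc] using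
                ih false [] (out ++ [Char.ofNat (pvDec b)])
            · simp only [ne_eq, not_not] at hb; subst hb
              simpa [List.foldl_cons, hq, hd, pvRunF, pvEmit] using ih false [] out
          · simpa [List.foldl_cons, hq, hd, hh, pvRunF] using ih false b out
    · by_cases hq : c = '\''
      · subst hq
        simpa [List.foldl_cons, pvRunT] using ih false b out
      · simpa [List.foldl_cons, hq, pvRunT, List.append_assoc] using ih true b (out ++ [c])

-- generic: fold appending g of each element
theorem pvFoldAppend (g : List Char → List Char) (l : List (List Char)) :
    ∀ a, l.foldl (fun acc p => acc ++ g p) a = a ++ (l.map g).flatten := by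
  induction l with
  | nil => simp
  | cons p ps ih => intro a; simp [ih, List.append_assoc]

theorem pvSegFold (s : List Char) :
    (s.splitOn '#').foldl (fun acc piece =>
        let digits := piece.filter PySem.Chars.isdigit
        if digits ≠ [] then acc ++ [Char.ofNat (pvDec digits)] else acc) [] =
      pvPieceOut [] s := by
  have h1 : (fun (acc piece : List Char) =>
      let digits := piece.filter PySem.Chars.isdigit
      if digits ≠ [] then acc ++ [Char.ofNat (pvDec digits)] else acc) =
      fun acc piece => acc ++ pvEmit (piece.filter PySem.Chars.isdigit) := by
    funext acc piece
    simp only [pvEmit]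
    split_ifs <;> simp
  obtain ⟨p, ps, hps⟩ : ∃ p ps, s.splitOn '#' = p :: ps := by
    cases h : s.splitOn '#' with
    | nil => exact absurd h (pv_splitOn_ne_nil _ _)
    | cons p ps => exact ⟨p, ps, rfl⟩
  rw [h1, pvFoldAppend (fun piece => pvEmit (piece.filter PySem.Chars.isdigit)) _ []]
  simp only [List.splitOn] at hps
  simp [pvPieceOut, List.splitOn, hps]

-- B's fold, from any state, computes pvGC / pvGS
theorem pvFoldB (segs : List (List Char)) : ∀ (code : Bool) (out : List Char),
    (segs.foldl (fun st seg =>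
        let (code, out) := st
        ((!code : Bool),
          if code then out ++ (seg.splitOn '#').foldl (fun acc piece =>
              let digits := piece.filter PySem.Chars.isdigit
              if digits ≠ [] then acc ++ [Char.ofNat (pvDec digits)] else acc) []
          else out ++ seg)) (code, out)).2 =
    out ++ (if code then pvGS ([] :: segs) else pvGS segs) := by
  induction segs with
  | nil =>
    intro code out
    cases code <;> simp [pvGS, pvGC, pvEmit]
  | cons s r ih =>
    intro code out
    cases code
    · simpa [List.foldl_cons, pvGS] using ih true (out ++ s)
    · have h := ih false (out ++ (s.splitOn '#').foldl (fun acc piece =>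
          let digits := piece.filter PySem.Chars.isdigit
          if digits ≠ [] then acc ++ [Char.ofNat (pvDec digits)] else acc) [])
      simp only [List.foldl_cons] at h ⊢
      simp only [pvSegFold] at h ⊢
      simp [h, pvGS, pvGC, List.append_assoc]

-- ===== VERDICT (by name: the statement is the Claim_ definition above) =====
theorem process_literal_spec : Claim_equal_process_literal := by
  intro text _ _
  unfold Spec_process_literal process_literal process_literal_alt
  simp only []
  rw [pvFoldA text.toList false [] []]
  rw [pvFoldB (text.toList.splitOn '\'') true []]
  have hmain := (pvRun_eq_split text.toList).1 []
  obtain ⟨s1, rest, hsp⟩ : ∃ s1 rest, text.toList.splitOn '\'' = s1 :: rest := by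
    cases h : text.toList.splitOn '\'' with
    | nil => exact absurd h (pv_splitOn_ne_nil _ _)
    | cons s1 rest => exact ⟨s1, rest, rfl⟩
  rw [hsp] at hmain ⊢
  simp only [pvGS, pvGC] at hmain ⊢
  simp [hmain]
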